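-- pv_equiv track=rewrite | github.com/zafodB/aoc2020 | aoc17.2.py | enlarge_field
-- ===== SOURCE A (Python) =====
-- import copy
--
-- def enlarge_field(state: list) -> list:
--     updated_state = copy.deepcopy(state)
--
--     # X +
--     for index_w, w_space in enumerate(state):
--         for index_z, z_plane in enumerate(w_space):
--             for index_y, y_row in enumerate(z_plane):
--                 updated_state[index_w][index_z][index_y] = y_row + ['.']
--
--     # X -
--     state = copy.deepcopy(updated_state)
--     for index_w, w_space in enumerate(state):
--         for index_z, z_plane in enumerate(w_space):
--             for index_y, y_row in enumerate(z_plane):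
--                 updated_state[index_w][index_z][index_y] = ['.'] + y_row
--
--     # Y -
--     state = copy.deepcopy(updated_state)
--     for index_w, w_space in enumerate(state):
--         for index_z, z_plane in enumerate(w_space):
--             new_y_row = ['.' for _ in range(len(state[0][0][0]))]
--             updated_state[index_w][index_z] = [new_y_row] + updated_state[index_w][index_z]
--
--     # Y +
--     state = copy.deepcopy(updated_state)
--     for index_w, w_space in enumerate(state):
--         for index_z, z_plane in enumerate(w_space):
--             new_y_row = ['.' for _ in range(len(state[0][0][0]))]
--             updated_state[index_w][index_z] = updated_state[index_w][index_z] + [new_y_row]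
--
--     # Z -
--     state = copy.deepcopy(updated_state)
--     for index_w, w_space in enumerate(state):
--         new_z_plane = []
--         for index_z in range(len(state[0][0])):
--             new_y_row = ['.' for _ in range(len(state[0][0][0]))]
--             new_z_plane.append(new_y_row)
--
--         updated_state[index_w] = [new_z_plane] + updated_state[index_w]
--
--     # Z +
--     state = copy.deepcopy(updated_state)
--     for index_w, w_space in enumerate(state):
--         new_z_plane = []
--         for index_z in range(len(state[0][0])):
--             new_y_row = ['.' for _ in range(len(state[0][0][0]))]
--             new_z_plane.append(new_y_row)
--
--         updated_state[index_w] = updated_state[index_w] + [new_z_plane]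
--
--     # W -
--     state = copy.deepcopy(updated_state)
--     new_w_space = []
--     for index_w in range(len(state[0])):
--         new_z_plane = []
--         for index_z in range(len(state[0][0])):
--             new_y_row = ['.' for _ in range(len(state[0][0][0]))]
--             new_z_plane.append(new_y_row)
--         new_w_space.append(new_z_plane)
--
--     updated_state = [new_w_space] + updated_state
--
--     # W +
--     state = copy.deepcopy(updated_state)
--     new_w_space = []
--     for index_w in range(len(state[0])):
--         new_z_plane = []
--         for index_z in range(len(state[0][0])):
--             new_y_row = ['.' for _ in range(len(state[0][0][0]))]
--             new_z_plane.append(new_y_row)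
--         new_w_space.append(new_z_plane)
--
--     updated_state = updated_state + [new_w_space]
--
--
--     return updated_state
-- ===== SOURCE B (Python) =====
-- def enlarge_field(state: list) -> list:
--     # One pass: build the +2-per-dimension grid directly, no deepcopies.
--     cols = len(state[0][0][0]) + 2
--     rows = len(state[0][0]) + 2
--     planes = len(state[0]) + 2
--     empty_row = ['.'] * cols
--     empty_plane = [list(empty_row) for _ in range(rows)]
--     empty_space = [[list(empty_row) for _ in range(rows)] for _ in range(planes)]
--
--     def pad_plane(z):
--         return [list(empty_row)] + [['.'] + y + ['.'] for y in z] + [list(empty_row)]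
--
--     def pad_space(w):
--         return [[list(empty_row) for _ in range(rows)]] + [pad_plane(z) for z in w] + [[list(empty_row) for _ in range(rows)]]
--
--     return [empty_space] + [pad_space(w) for w in state] + [[[list(empty_row) for _ in range(rows)] for _ in range(planes)]]
-- ===== Notes on version B (the rewrite author's own statement) =====
-- stated objective: simpler
-- what changed: B constructs the +2-per-dimension padded grid directly in a single nested pass (precomputed border row/plane/space plus one map over the existing cells) instead of A's eight sequential passes each preceded by a full deepcopy of the whole 4D grid.
import Mathlib
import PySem

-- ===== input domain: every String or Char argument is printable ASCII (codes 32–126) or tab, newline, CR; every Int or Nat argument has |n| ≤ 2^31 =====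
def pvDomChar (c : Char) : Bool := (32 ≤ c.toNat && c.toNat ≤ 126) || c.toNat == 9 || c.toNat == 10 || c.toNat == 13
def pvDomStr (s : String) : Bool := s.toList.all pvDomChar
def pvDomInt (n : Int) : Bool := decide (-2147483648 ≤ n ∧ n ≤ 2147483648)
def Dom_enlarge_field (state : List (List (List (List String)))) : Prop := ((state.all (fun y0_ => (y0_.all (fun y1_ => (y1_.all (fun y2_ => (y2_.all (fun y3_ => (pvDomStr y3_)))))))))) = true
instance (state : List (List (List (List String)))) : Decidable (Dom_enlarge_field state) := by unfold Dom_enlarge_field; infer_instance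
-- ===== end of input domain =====

-- B builds the enlarged grid in one pass (+2 per dimension, '.'-filled borders) instead of A's eight
-- deepcopy-and-pad passes; return-value equivalence only (A mutates nothing observable to the caller).

-- ===== PORT A =====
-- Eight passes, each a pure map over the previous state (A's index assignment into a deepcopy is a map).
def enlarge_field (state : List (List (List (List String)))) : List (List (List (List String))) :=
  -- X +
  let s1 := state.map (fun w => w.map (fun z => z.map (fun y => y ++ ["."])))
  -- X -
  let s2 := s1.map (fun w => w.map (fun z => z.map (fun y => ["."] ++ y)))
  -- Y -  (new row length = len(state[0][0][0]) of the current state)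
  let s3 := s2.map (fun w => w.map (fun z => [List.replicate s2.headI.headI.headI.length "."] ++ z))
  -- Y +
  let s4 := s3.map (fun w => w.map (fun z => z ++ [List.replicate s3.headI.headI.headI.length "."]))
  -- Z -  (new plane: len(state[0][0]) rows of len(state[0][0][0]))
  let s5 := s4.map (fun w => [List.replicate s4.headI.headI.length (List.replicate s4.headI.headI.headI.length ".")] ++ w)
  -- Z +
  let s6 := s5.map (fun w => w ++ [List.replicate s5.headI.headI.length (List.replicate s5.headI.headI.headI.length ".")])
  -- W -
  let s7 := [List.replicate s6.headI.length (List.replicate s6.headI.headI.length (List.replicate s6.headI.headI.headI.length "."))] ++ s6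
  -- W +
  s7 ++ [List.replicate s7.headI.length (List.replicate s7.headI.headI.length (List.replicate s7.headI.headI.headI.length "."))]

-- ===== PORT B =====
def bPadRow (y : List String) : List String := "." :: y ++ ["."]
def bPadPlane (emptyRow : List String) (z : List (List String)) : List (List String) :=
  emptyRow :: z.map bPadRow ++ [emptyRow]
def bPadSpace (emptyRow : List String) (rows : Nat) (w : List (List (List String))) :
    List (List (List String)) :=
  List.replicate rows emptyRow :: w.map (bPadPlane emptyRow) ++ [List.replicate rows emptyRow]

def enlarge_field_alt (state : List (List (List (List String)))) : List (List (List (List String))) :=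
  let cols := state.headI.headI.headI.length + 2
  let rows := state.headI.headI.length + 2
  let planes := state.headI.length + 2
  let emptyRow := List.replicate cols "."
  let emptySpace := List.replicate planes (List.replicate rows emptyRow)
  emptySpace :: state.map (bPadSpace emptyRow rows) ++
    [List.replicate planes (List.replicate rows emptyRow)]

-- ===== PRECONDITION & SPEC =====
-- Pre_ excludes exactly the inputs on which A raises IndexError (empty state, empty first
-- w-space, or empty first z-plane: A indexes state[0][0][0]); B raises there as well.
def Pre_enlarge_field (state : List (List (List (List String)))) : Prop :=
  state ≠ [] ∧ state.headI ≠ [] ∧ state.headI.headI ≠ []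
instance (state : List (List (List (List String)))) : Decidable (Pre_enlarge_field state) := by
  unfold Pre_enlarge_field; infer_instance
def pvWitness_enlarge_field : List (List (List (List String))) := [[[["#", "."]]]]

def Spec_enlarge_field (state : List (List (List (List String)))) (out : List (List (List (List String)))) : Prop := out = enlarge_field_alt state
instance (state : List (List (List (List String)))) (out : List (List (List (List String)))) : Decidable (Spec_enlarge_field state out) := by unfold Spec_enlarge_field; infer_instance

-- ===== CLAIM (what is proved, stated in full; the proofs are below) =====
def Claim_equal_enlarge_field : Prop := ∀ (state : List (List (List (List String)))), Dom_enlarge_field state → Pre_enlarge_field state → Spec_enlarge_field state (enlarge_field state)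

-- ===== LEMMAS AND PROOFS =====

-- ===== VERDICT (by name: the statement is the Claim_ definition above) =====
theorem enlarge_field_spec : Claim_equal_enlarge_field := by
  intro state _ hpre
  obtain ⟨h1, h2, h3⟩ := hpre
  rcases state with _ | ⟨w0, ws⟩
  · exact absurd rfl h1
  rcases w0 with _ | ⟨z0, zs⟩
  · simp [List.headI] at h2
  rcases z0 with _ | ⟨y0, ys⟩
  · simp [List.headI] at h3
  show enlarge_field _ = enlarge_field_alt _
  simp [enlarge_field, enlarge_field_alt, bPadSpace, bPadPlane, bPadRow,
    List.map_map, Function.comp, List.headI, List.replicate_succ, List.length_replicate]
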